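-- pv_equiv track=rewrite | github.com/GirishRPardeshi/Pattern_Explorer | Pattern.py | hollow_pyramid
-- ===== SOURCE A (Python) =====
-- def hollow_pyramid(rows=5):
--     out = []
--     for i in range(1, rows + 1):
--         row = []
--         row.append(" " * (rows - i))
--         for j in range(1, 2 * i):
--             if j == 1 or j == 2 * i - 1 or i == rows:
--                 row.append("*")
--             else:
--                 row.append(" ")
--         out.append("".join(row))
--     return "\n".join(out)
-- ===== SOURCE B (Python) =====
-- def hollow_pyramid(rows=5):
--     lines = []
--     for i in range(1, rows + 1):
--         if i == rows:
--             body = "*" * (2 * i - 1)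
--         elif i == 1:
--             body = "*"
--         else:
--             body = "*" + " " * (2 * i - 3) + "*"
--         lines.append(" " * (rows - i) + body)
--     return "\n".join(lines)
-- ===== Notes on version B (the rewrite author's own statement) =====
-- stated objective: simpler
-- what changed: The inner per-character loop with its three-way position test is removed; each row body is built directly by string repetition ('*'*(2i-1) for the base row, '*' for the apex, '*'+' '*(2i-3)+'*' otherwise).
import Mathlib
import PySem

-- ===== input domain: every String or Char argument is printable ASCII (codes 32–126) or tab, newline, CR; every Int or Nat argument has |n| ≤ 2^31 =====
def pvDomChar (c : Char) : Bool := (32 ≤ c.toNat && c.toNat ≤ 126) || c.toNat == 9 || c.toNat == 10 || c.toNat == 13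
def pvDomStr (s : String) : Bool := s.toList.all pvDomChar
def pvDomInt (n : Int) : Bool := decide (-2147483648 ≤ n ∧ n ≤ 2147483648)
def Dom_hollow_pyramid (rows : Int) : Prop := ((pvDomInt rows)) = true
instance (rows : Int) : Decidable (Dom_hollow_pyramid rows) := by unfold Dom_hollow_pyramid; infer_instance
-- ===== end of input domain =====

-- B replaces A's inner per-character loop by a closed-form row body; equivalence is on the return value.

-- ===== PORT A =====
def hollow_pyramid (rows : Int) : String :=
  let out := (PySem.List.pyRange 1 (rows + 1) 1).foldl (fun out i =>
    let row : List (List Char) := [PySem.List.pyRepeat [' '] (rows - i)]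
    let row := (PySem.List.pyRange 1 (2 * i) 1).foldl (fun row j =>
      if j = 1 ∨ j = 2 * i - 1 ∨ i = rows then row ++ [['*']] else row ++ [[' ']]) row
    out ++ [PySem.Chars.join [] row]) []
  String.ofList (PySem.Chars.join ['\n'] out)

-- ===== PORT B =====
def hollow_pyramid_alt (rows : Int) : String :=
  let lines := (PySem.List.pyRange 1 (rows + 1) 1).foldl (fun lines i =>
    let body : List Char :=
      if i = rows then PySem.List.pyRepeat ['*'] (2 * i - 1)
      else if i = 1 then ['*']
      else ['*'] ++ PySem.List.pyRepeat [' '] (2 * i - 3) ++ ['*']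
    lines ++ [PySem.List.pyRepeat [' '] (rows - i) ++ body]) []
  String.ofList (PySem.Chars.join ['\n'] lines)

-- ===== PRECONDITION & SPEC =====
def Spec_hollow_pyramid (rows : Int) (out : String) : Prop := out = hollow_pyramid_alt rows
instance (rows : Int) (out : String) : Decidable (Spec_hollow_pyramid rows out) := by unfold Spec_hollow_pyramid; infer_instance

-- ===== CLAIM (what is proved, stated in full; the proofs are below) =====
def Claim_equal_hollow_pyramid : Prop := ∀ (rows : Int), Dom_hollow_pyramid rows → Spec_hollow_pyramid rows (hollow_pyramid rows)

-- ===== LEMMAS AND PROOFS =====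

theorem join_nil_eq_flatten (l : List (List Char)) : PySem.Chars.join [] l = l.flatten := by
  induction l with
  | nil => simp [PySem.Chars.join, List.intercalate]
  | cons x t ih =>
    cases t with
    | nil => simp [PySem.Chars.join, List.intercalate]
    | cons y s => simpa [PySem.Chars.join_cons_cons] using ih

-- the body of row i produced by A's inner loop equals B's closed form, for 1 ≤ i ≤ rows
theorem flatten_map_const {α : Type} (l : List α) (a : Char) :
    (l.map (fun _ => ([a] : List Char))).flatten = List.replicate l.length a := by
  induction l with
  | nil => rfl
  | cons x t ih => simp [List.replicate_succ]

theorem row_eq (rows i : Int) (h1 : 1 ≤ i) (h2 : i ≤ rows) :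
    ((PySem.List.pyRange 1 (2 * i) 1).map
        (fun j => if j = 1 ∨ j = 2 * i - 1 ∨ i = rows then ['*'] else ([' '] : List Char))).flatten =
      (if i = rows then PySem.List.pyRepeat ['*'] (2 * i - 1)
       else if i = 1 then ['*']
       else ['*'] ++ PySem.List.pyRepeat [' '] (2 * i - 3) ++ ['*']) := by
  by_cases hr : i = rows
  · -- base row: every position is '*'
    have : ((PySem.List.pyRange 1 (2 * i) 1).map
        (fun j => if j = 1 ∨ j = 2 * i - 1 ∨ i = rows then ['*'] else ([' '] : List Char))) =
        (PySem.List.pyRange 1 (2 * i) 1).map (fun _ => (['*'] : List Char)) := by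
      exact List.map_congr_left (fun j _ => by simp [hr])
    rw [this, flatten_map_const, hr, PySem.List.pyRepeat_singleton,
      PySem.List.length_pyRange_one]
    simp
  · by_cases h1' : i = 1
    · subst h1'
      rw [show (2 : Int) * 1 = 1 + 1 by ring, PySem.List.pyRange_one_singleton]
      simp [hr]
    · -- 2 ≤ i < rows : '*', spaces, '*'
      have hi2 : 2 ≤ i := by omega
      have hs1 : PySem.List.pyRange 1 (2 * i) 1 =
          PySem.List.pyRange 1 2 1 ++ PySem.List.pyRange 2 (2 * i) 1 :=
        PySem.List.pyRange_one_append 1 2 (2 * i) (by omega) (by omega)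
      have hs2 : PySem.List.pyRange 2 (2 * i) 1 =
          PySem.List.pyRange 2 (2 * i - 1) 1 ++ PySem.List.pyRange (2 * i - 1) (2 * i) 1 :=
        PySem.List.pyRange_one_append 2 (2 * i - 1) (2 * i) (by omega) (by omega)
      have hone : PySem.List.pyRange 1 2 1 = [1] := by
        simpa using PySem.List.pyRange_one_singleton (a := 1)
      have hlast : PySem.List.pyRange (2 * i - 1) (2 * i) 1 = [2 * i - 1] := by
        simpa [show 2 * i - 1 + 1 = 2 * i by ring] using
          PySem.List.pyRange_one_singleton (a := 2 * i - 1)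
      have hmid : (PySem.List.pyRange 2 (2 * i - 1) 1).map
          (fun j => if j = 1 ∨ j = 2 * i - 1 ∨ i = rows then ['*'] else ([' '] : List Char)) =
          (PySem.List.pyRange 2 (2 * i - 1) 1).map (fun _ => ([' '] : List Char)) := by
        refine List.map_congr_left (fun j hj => ?_)
        have := (PySem.List.mem_pyRange_one).1 hj
        have : ¬ (j = 1 ∨ j = 2 * i - 1 ∨ i = rows) := by
          rintro (h | h | h)
          · omega
          · omega
          · exact hr h
        simp [this]
      rw [hs1, hs2, hone, hlast]
      simp only [List.map_append, List.flatten_append, hmid]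
      rw [flatten_map_const, PySem.List.length_pyRange_one]
      simp [hr, h1', PySem.List.pyRepeat_singleton]
      omega

-- each of A's finished lines equals B's line, for i in the row range
theorem line_eq (rows i : Int) (hi : i ∈ PySem.List.pyRange 1 (rows + 1) 1) :
    PySem.Chars.join []
        ((PySem.List.pyRange 1 (2 * i) 1).foldl (fun row j =>
            if j = 1 ∨ j = 2 * i - 1 ∨ i = rows then row ++ [['*']] else row ++ [[' ']])
          [PySem.List.pyRepeat [' '] (rows - i)]) =
      PySem.List.pyRepeat [' '] (rows - i) ++
        (if i = rows then PySem.List.pyRepeat ['*'] (2 * i - 1)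
         else if i = 1 then ['*']
         else ['*'] ++ PySem.List.pyRepeat [' '] (2 * i - 3) ++ ['*']) := by
  have hmem := (PySem.List.mem_pyRange_one).1 hi
  have hfold : (PySem.List.pyRange 1 (2 * i) 1).foldl (fun row j =>
      if j = 1 ∨ j = 2 * i - 1 ∨ i = rows then row ++ [['*']] else row ++ [[' ']])
      [PySem.List.pyRepeat [' '] (rows - i)] =
      [PySem.List.pyRepeat [' '] (rows - i)] ++
        (PySem.List.pyRange 1 (2 * i) 1).map
          (fun j => if j = 1 ∨ j = 2 * i - 1 ∨ i = rows then ['*'] else ([' '] : List Char)) := by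
    rw [← PySem.List.foldl_append_singleton_eq_map]
    refine PySem.List.foldl_congr_mem _
      (fun row j => if j = 1 ∨ j = 2 * i - 1 ∨ i = rows then row ++ [['*']] else row ++ [[' ']])
      (fun acc j => acc ++ [if j = 1 ∨ j = 2 * i - 1 ∨ i = rows then ['*'] else [' ']])
      _ ?_
    intro acc j _
    simp only []
    split_ifs <;> rfl
  rw [hfold, join_nil_eq_flatten, List.flatten_append,
    row_eq rows i (by omega) (by omega)]
  simp

-- ===== VERDICT (by name: the statement is the Claim_ definition above) =====
theorem hollow_pyramid_spec : Claim_equal_hollow_pyramid := by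
  intro rows _
  unfold Spec_hollow_pyramid hollow_pyramid hollow_pyramid_alt
  simp only [PySem.List.foldl_append_singleton_eq_map, List.nil_append]
  congr 1
  exact congrArg _ (List.map_congr_left (fun i hi => line_eq rows i hi))
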